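-- pv_equiv track=rewrite | github.com/louisyang2015/movie_recommender | python/full_data/my_util.py | convert_ratings_to_list_of_list
-- ===== SOURCE A (Python) =====
-- def convert_ratings_to_list_of_list(movie_ratings):
--     """ Convert information in a list of (movie_id, rating)
--     format to a list of lists format that is suitable
--     for rank agreement computation.
--
--     :param movie_ratings: a list of (movie_id, rating) tuples
--     :return: a list that looks like [[movies with 5 stars], [movie with 4 stars], [movies with 3 stars], ...]
--     """
--
--     # collect movie ids into lists, grouped by ratings
--     rating_to_movie_id = {}
--
--     for movie_id, rating in movie_ratings:
--         if rating not in rating_to_movie_id: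
--             rating_to_movie_id[rating] = []
--
--         rating_to_movie_id[rating].append(movie_id)
--
--     # create a list of lists, sorted by ratings
--     rating_keys = list(rating_to_movie_id.keys())
--     rating_keys.sort(reverse=True)
--
--     list_of_lists = []
--     for rating in rating_keys:
--         list_of_lists.append(rating_to_movie_id[rating])
--
--     return list_of_lists
-- ===== SOURCE B (Python) =====
-- def convert_ratings_to_list_of_list(movie_ratings):
--     """Stable-sort the whole list by rating descending, then one linear
--     grouping pass: start a new sublist whenever the rating changes."""
--     s = sorted(movie_ratings, key=lambda mr: mr[1], reverse=True)
--     if not s: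
--         return []
--     result = []
--     cur = [s[0][0]]
--     prev = s[0][1]
--     for movie_id, rating in s[1:]:
--         if rating != prev:
--             result.append(cur)
--             cur = [movie_id]
--         else:
--             cur.append(movie_id)
--         prev = rating
--     result.append(cur)
--     return result
-- ===== Notes on version B (the rewrite author's own statement) =====
-- stated objective: alternative
-- what changed: Replaces hash-grouping into a dict followed by sorting the distinct ratings with a single stable sort of the whole list by rating descending followed by one linear grouping pass.
import Mathlib
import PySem

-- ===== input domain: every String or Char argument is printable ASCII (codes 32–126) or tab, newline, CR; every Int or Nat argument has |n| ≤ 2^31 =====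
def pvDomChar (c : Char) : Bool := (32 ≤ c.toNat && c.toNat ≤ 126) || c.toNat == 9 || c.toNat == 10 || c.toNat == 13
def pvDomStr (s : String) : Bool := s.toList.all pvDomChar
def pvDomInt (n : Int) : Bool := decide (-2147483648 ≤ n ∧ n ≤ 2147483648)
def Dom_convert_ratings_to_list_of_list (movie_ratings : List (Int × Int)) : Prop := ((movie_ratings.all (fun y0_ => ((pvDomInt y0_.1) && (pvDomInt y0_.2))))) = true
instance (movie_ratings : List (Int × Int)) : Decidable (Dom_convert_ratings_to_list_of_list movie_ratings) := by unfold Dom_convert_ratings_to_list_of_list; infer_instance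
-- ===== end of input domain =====

-- B replaces A's hash-group-then-sort-distinct-keys decomposition with one stable
-- sort of the whole list by rating descending followed by a single linear grouping
-- pass (alternative decomposition, same exact result).


-- ===== PORT A =====
def convert_ratings_to_list_of_list (movie_ratings : List (Int × Int)) : List (List Int) :=
  -- 'for movie_id, rating in movie_ratings: if rating not in d: d[rating] = []; d[rating].append(movie_id)'
  let rating_to_movie_id : PySem.Dict Int (List Int) :=
    movie_ratings.foldl (fun d p =>
      let d := if d.contains p.2 then d else d.insert p.2 ([] : List Int)
      d.modify p.2 [] (fun l => l ++ [p.1])) PySem.Dict.empty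
  -- 'rating_keys = list(d.keys()); rating_keys.sort(reverse=True)'
  let rating_keys := PySem.List.sorted rating_to_movie_id.keys (fun x => x) true
  -- 'for rating in rating_keys: list_of_lists.append(d[rating])'
  rating_keys.foldl (fun acc r => acc ++ [rating_to_movie_id.getD r []]) []

-- ===== PORT B =====
-- the 'for movie_id, rating in s[1:]' loop of Source B, plus the trailing 'result.append(cur)'
def pvBGo : List (Int × Int) → List (List Int) → List Int → Int → List (List Int)
  | [], res, cur, _ => res ++ [cur]
  | (m, r) :: t, res, cur, prev =>
      if r ≠ prev then pvBGo t (res ++ [cur]) [m] r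
      else pvBGo t res (cur ++ [m]) r

def convert_ratings_to_list_of_list_alt (movie_ratings : List (Int × Int)) : List (List Int) :=
  -- 's = sorted(movie_ratings, key=lambda mr: mr[1], reverse=True); if not s: return []'
  match PySem.List.sorted movie_ratings (fun mr => mr.2) true with
  | [] => []
  | (m, r) :: t => pvBGo t [] [m] r   -- cur = [s[0][0]], prev = s[0][1]

-- ===== PRECONDITION & SPEC =====
def Spec_convert_ratings_to_list_of_list (movie_ratings : List (Int × Int)) (out : List (List Int)) : Prop := out = convert_ratings_to_list_of_list_alt movie_ratings
instance (movie_ratings : List (Int × Int)) (out : List (List Int)) : Decidable (Spec_convert_ratings_to_list_of_list movie_ratings out) := by unfold Spec_convert_ratings_to_list_of_list; infer_instance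

-- ===== CLAIM (what is proved, stated in full; the proofs are below) =====
def Claim_equal_convert_ratings_to_list_of_list : Prop := ∀ (movie_ratings : List (Int × Int)), Dom_convert_ratings_to_list_of_list movie_ratings → Spec_convert_ratings_to_list_of_list movie_ratings (convert_ratings_to_list_of_list movie_ratings)

-- ===== LEMMAS AND PROOFS =====

-- the distinct ratings of the input, sorted descending
def pvDs (movie_ratings : List (Int × Int)) : List Int :=
  PySem.List.sorted (PySem.List.dedup (movie_ratings.map (fun p => p.2))) (fun x => x) true

-- the group of a rating: its pairs, in input order
def pvGrp (movie_ratings : List (Int × Int)) (r : Int) : List (Int × Int) :=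
  movie_ratings.filter (fun p => p.2 == r)

-- insert a rating into a strictly decreasing list of ratings
def pvInsDesc (r : Int) : List Int → List Int
  | [] => [r]
  | a :: t => if r < a then a :: pvInsDesc r t else if r = a then a :: t else r :: a :: t

theorem pvInsDesc_cons (r a : Int) (t : List Int) :
    pvInsDesc r (a :: t) = if r < a then a :: pvInsDesc r t
      else if r = a then a :: t else r :: a :: t := rfl

-- insertBy passes over a prefix it does not insert before
theorem pvInsertBy_pass {α : Type} (before : α → α → Bool) (x : α) (ys zs : List α)
    (h : ∀ y ∈ ys, before x y = false) :
    PySem.List.insertBy before x (ys ++ zs) = ys ++ PySem.List.insertBy before x zs := by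
  induction ys with
  | nil => simp
  | cons y t ih =>
    simp only [List.cons_append, PySem.List.insertBy, h y (by simp)]
    simp only [Bool.false_eq_true, if_false, List.cons.injEq, true_and]
    exact ih (fun y hy => h y (by simp [hy]))

theorem pvInsertBy_front {α : Type} (before : α → α → Bool) (x : α) (zs : List α)
    (h : ∀ z ∈ zs, before x z = true) :
    PySem.List.insertBy before x zs = x :: zs := by
  cases zs with
  | nil => rfl
  | cons z t => simp [PySem.List.insertBy, h z (by simp)]

theorem pvInsDesc_mem (r y : Int) (rs : List Int) (h : y ∈ pvInsDesc r rs) : y = r ∨ y ∈ rs := by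
  induction rs with
  | nil => simp [pvInsDesc] at h; exact Or.inl h
  | cons a t ih =>
    rw [pvInsDesc_cons] at h
    split_ifs at h with h1 h2
    · rcases List.mem_cons.mp h with rfl | h'
      · exact Or.inr (by simp)
      · rcases ih h' with h'' | h''
        · exact Or.inl h''
        · exact Or.inr (by simp [h''])
    · exact Or.inr h
    · rcases List.mem_cons.mp h with rfl | h'
      · exact Or.inl rfl
      · exact Or.inr h' 

theorem pvInsDesc_of_mem (r : Int) (rs : List Int) (hp : rs.Pairwise (· > ·)) (h : r ∈ rs) :
    pvInsDesc r rs = rs := by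
  induction rs with
  | nil => simp at h
  | cons a t ih =>
    simp only [pvInsDesc]
    rcases List.mem_cons.mp h with h | h
    · simp [h]
    · have hlt : r < a := (List.pairwise_cons.mp hp).1 r h
      rw [if_pos hlt, ih (List.pairwise_cons.mp hp).2 h]

theorem pvInsDesc_pairwise (r : Int) (rs : List Int) (hp : rs.Pairwise (· > ·)) :
    (pvInsDesc r rs).Pairwise (· > ·) := by
  induction rs with
  | nil => simp [pvInsDesc]
  | cons a t ih =>
    obtain ⟨ha, ht⟩ := List.pairwise_cons.mp hp
    rw [pvInsDesc_cons]
    split_ifs with h1 h2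
    · refine List.pairwise_cons.mpr ⟨?_, ih ht⟩
      intro y hy
      rcases pvInsDesc_mem r y t hy with rfl | hy
      · exact h1
      · exact ha y hy
    · exact hp
    · have : a < r := by omega
      refine List.pairwise_cons.mpr ⟨?_, hp⟩
      intro y hy
      rcases List.mem_cons.mp hy with rfl | hy
      · exact this
      · exact lt_trans (ha y hy) this

theorem pvInsDesc_perm (r : Int) (rs : List Int) (hnm : r ∉ rs) : (pvInsDesc r rs).Perm (r :: rs) := by
  induction rs with
  | nil => simp [pvInsDesc]
  | cons a t ih =>
    have hna : r ≠ a := fun h => hnm (by simp [h])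
    have hnt : r ∉ t := fun h => hnm (by simp [h])
    rw [pvInsDesc_cons]
    split_ifs with h1
    · exact (List.Perm.cons a (ih hnt)).trans (List.Perm.swap r a t)
    · rfl

theorem pvDs_nodup (mrs : List (Int × Int)) : (pvDs mrs).Nodup :=
  (PySem.List.sorted_perm _ _ _).nodup_iff.mpr (by
    rw [PySem.List.dedup_eq_ofList]; exact PySem.Set.nodup_ofList _)

theorem pvDs_pairwise (mrs : List (Int × Int)) : (pvDs mrs).Pairwise (· > ·) := by
  have h1 := PySem.List.sorted_pairwise_rev (PySem.List.dedup (mrs.map (fun p => p.2))) (fun x => x)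
  have h2 := (pvDs_nodup mrs)
  rw [List.nodup_iff_pairwise_ne] at h2
  exact (h1.and h2).imp (fun h => lt_of_le_of_ne h.1 h.2.symm)

theorem pvDs_mem (mrs : List (Int × Int)) (r : Int) :
    r ∈ pvDs mrs ↔ r ∈ mrs.map (fun p => p.2) := by
  rw [pvDs, PySem.List.mem_sorted, PySem.List.dedup_eq_ofList, PySem.Set.mem_ofList]

theorem pvDs_append (mrs : List (Int × Int)) (x : Int × Int) :
    pvDs (mrs ++ [x]) = pvInsDesc x.2 (pvDs mrs) := by
  apply PySem.List.sorted_rev_eq_of_perm_of_pairwise_gt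
  · -- perm to dedup of (ratings ++ [x.2])
    have hmap : (mrs ++ [x]).map (fun p => p.2) = mrs.map (fun p => p.2) ++ [x.2] := by simp
    rw [hmap, PySem.List.dedup_eq_ofList]
    have hof : PySem.Set.ofList (mrs.map (fun p => p.2) ++ [x.2])
        = PySem.Set.add (PySem.Set.ofList (mrs.map (fun p => p.2))) x.2 := by
      simp [PySem.Set.ofList, List.foldl_append]
    rw [hof]
    by_cases hmem : x.2 ∈ mrs.map (fun p => p.2)
    · have hc : (PySem.Set.ofList (mrs.map (fun p => p.2))).contains x.2 = true := by
        have hm : x.2 ∈ PySem.Set.ofList (mrs.map (fun p => p.2)) :=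
          (PySem.Set.mem_ofList _ _).mpr hmem
        simpa [PySem.Set.contains] using hm
      rw [PySem.Set.add, if_pos hc]
      rw [pvInsDesc_of_mem _ _ (pvDs_pairwise mrs) ((pvDs_mem mrs x.2).mpr hmem)]
      have := PySem.List.sorted_perm (PySem.List.dedup (mrs.map (fun p => p.2))) (fun x => x) true
      rw [PySem.List.dedup_eq_ofList] at this
      exact this
    · have hc : (PySem.Set.ofList (mrs.map (fun p => p.2))).contains x.2 = false := by
        simpa [PySem.Set.contains] using hmem
      rw [PySem.Set.add, if_neg (by rw [hc]; simp)]
      have hnm : x.2 ∉ pvDs mrs := fun h => hmem ((pvDs_mem mrs x.2).mp h)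
      refine (pvInsDesc_perm x.2 (pvDs mrs) hnm).trans ?_
      have hp : (pvDs mrs).Perm (PySem.Set.ofList (mrs.map (fun p => p.2))) := by
        have := PySem.List.sorted_perm (PySem.List.dedup (mrs.map (fun p => p.2))) (fun x => x) true
        rwa [PySem.List.dedup_eq_ofList] at this
      exact (hp.cons x.2).trans (List.perm_append_singleton x.2 _).symm
  · exact pvInsDesc_pairwise _ _ (pvDs_pairwise mrs)

theorem pvBGo_nil (res : List (List Int)) (cur : List Int) (prev : Int) :
    pvBGo [] res cur prev = res ++ [cur] := rfl

theorem pvBGo_cons (m r : Int) (t : List (Int × Int)) (res : List (List Int))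
    (cur : List Int) (prev : Int) :
    pvBGo ((m, r) :: t) res cur prev
      = if r ≠ prev then pvBGo t (res ++ [cur]) [m] r else pvBGo t res (cur ++ [m]) r := rfl

theorem pvFlatMap_congr {α β : Type} (l : List α) (f g : α → List β)
    (h : ∀ x ∈ l, f x = g x) : l.flatMap f = l.flatMap g := by
  induction l with
  | nil => rfl
  | cons a t ih =>
    simp only [List.flatMap_cons, h a (by simp)]
    rw [ih (fun x hx => h x (by simp [hx]))]

theorem pvInsert_flat (x : Int × Int) (rs : List Int) (f : Int → List (Int × Int))
    (hp : rs.Pairwise (· > ·))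
    (hconst : ∀ r' ∈ rs, ∀ p ∈ f r', p.2 = r')
    (hne : x.2 ∉ rs → f x.2 = []) :
    PySem.List.insertBy (fun a b => decide (b.2 < a.2)) x (rs.flatMap f)
      = (pvInsDesc x.2 rs).flatMap (fun r' => f r' ++ if x.2 = r' then [x] else []) := by
  induction rs generalizing f with
  | nil =>
    simp only [List.flatMap_nil, pvInsDesc, List.flatMap_cons, List.flatMap_nil,
      hne (List.not_mem_nil)]
    rfl
  | cons a t ih =>
    obtain ⟨ha, ht⟩ := List.pairwise_cons.mp hp
    rw [pvInsDesc_cons, List.flatMap_cons]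
    rcases lt_trichotomy x.2 a with h1 | h1 | h1
    · rw [if_pos h1]
      rw [pvInsertBy_pass _ x (f a) _ (fun y hy => by
        have : y.2 = a := hconst a (by simp) y hy
        simp [this]; omega)]
      rw [List.flatMap_cons]
      have hxa : x.2 ≠ a := by omega
      have : (if x.2 = a then [x] else []) = [] := if_neg hxa
      rw [this, List.append_nil]
      congr 1
      exact ih f ht (fun r' hr' => hconst r' (by simp [hr'])) (fun hnm => hne (by
        simp only [List.mem_cons, not_or]; exact ⟨hxa, hnm⟩))
    · rw [if_neg (by omega), if_pos h1, List.flatMap_cons]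
      rw [pvInsertBy_pass _ x (f a) _ (fun y hy => by
        have : y.2 = a := hconst a (by simp) y hy
        simp [this]; omega)]
      rw [pvInsertBy_front _ x _ (fun z hz => by
        obtain ⟨r', hr', hzf⟩ := List.mem_flatMap.mp hz
        have : z.2 = r' := hconst r' (by simp [hr']) z hzf
        have : z.2 < a := by rw [this]; exact ha r' hr'
        simp; omega)]
      rw [if_pos h1]
      have : t.flatMap (fun r' => f r' ++ if x.2 = r' then [x] else []) = t.flatMap f := by
        apply pvFlatMap_congr
        intro r' hr'
        have : x.2 ≠ r' := by have := ha r' hr'; omega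
        simp [this]
      rw [this]
      simp
    · rw [if_neg (by omega), if_neg (by omega)]
      rw [pvInsertBy_front _ x _ (fun z hz => by
        rcases List.mem_append.mp hz with hz | hz
        · have : z.2 = a := hconst a (by simp) z hz
          simp [this]; omega
        · obtain ⟨r', hr', hzf⟩ := List.mem_flatMap.mp hz
          have h2 : z.2 = r' := hconst r' (by simp [hr']) z hzf
          have := ha r' hr'
          simp; omega)]
      have hxnm : x.2 ∉ a :: t := by
        simp only [List.mem_cons, not_or]
        refine ⟨by omega, fun hm => ?_⟩
        have := ha x.2 hm; omega
      rw [List.flatMap_cons, List.flatMap_cons]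
      rw [hne hxnm]
      have h3 : (if x.2 = x.2 then [x] else []) = [x] := if_pos rfl
      have h4 : (if x.2 = a then [x] else []) = [] := if_neg (by omega)
      rw [h3, h4, List.append_nil]
      have : t.flatMap (fun r' => f r' ++ if x.2 = r' then [x] else []) = t.flatMap f := by
        apply pvFlatMap_congr
        intro r' hr'
        have h5 := ha r' hr'
        have : x.2 ≠ r' := by omega
        simp [this]
      rw [this]
      simp

theorem pvGrp_const (mrs : List (Int × Int)) (r : Int) :
    ∀ p ∈ pvGrp mrs r, p.2 = r := by
  intro p hp
  have := List.of_mem_filter hp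
  simpa using this

theorem pvGrp_nil_of_not_mem (mrs : List (Int × Int)) (r : Int)
    (h : r ∉ mrs.map (fun p => p.2)) : pvGrp mrs r = [] := by
  rw [pvGrp, List.filter_eq_nil_iff]
  intro p hp
  simp only [beq_iff_eq]
  intro h2
  exact h (List.mem_map.mpr ⟨p, hp, h2⟩)

theorem pvGrp_ne_nil (mrs : List (Int × Int)) (r : Int)
    (h : r ∈ mrs.map (fun p => p.2)) : pvGrp mrs r ≠ [] := by
  obtain ⟨p, hp, h2⟩ := List.mem_map.mp h
  intro hnil
  have : p ∈ pvGrp mrs r := List.mem_filter.mpr ⟨hp, by simp [h2]⟩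
  rw [hnil] at this
  simp at this

theorem pvSorted_eq_flat (mrs : List (Int × Int)) :
    PySem.List.sorted mrs (fun mr => mr.2) true = (pvDs mrs).flatMap (pvGrp mrs) := by
  induction mrs using List.reverseRecOn with
  | nil => rfl
  | append_singleton l x ih =>
    have hstep : PySem.List.sorted (l ++ [x]) (fun mr => mr.2) true
        = PySem.List.insertBy (fun a b => decide (b.2 < a.2)) x
            (PySem.List.sorted l (fun mr => mr.2) true) := by
      rw [PySem.List.sorted_rev_eq_foldl_insertBy, PySem.List.sorted_rev_eq_foldl_insertBy,
        List.foldl_append]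
      rfl
    rw [hstep, ih]
    rw [pvInsert_flat x (pvDs l) (pvGrp l) (pvDs_pairwise l)
      (fun r' _ => pvGrp_const l r')
      (fun hnm => pvGrp_nil_of_not_mem l x.2 (fun hm => hnm ((pvDs_mem l x.2).mpr hm)))]
    rw [pvDs_append]
    apply pvFlatMap_congr
    intro r' _
    rw [pvGrp, pvGrp, List.filter_append]
    congr 1
    by_cases h : x.2 = r' <;> simp [h]

theorem pvBGo_flat : ∀ (rs : List Int) (f : Int → List (Int × Int)) (r : Int)
    (block : List (Int × Int)) (res : List (List Int)) (cur : List Int),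
    rs.Nodup → (∀ r' ∈ rs, r' ≠ r) → (∀ r' ∈ rs, f r' ≠ []) →
    (∀ r' ∈ rs, ∀ p ∈ f r', p.2 = r') → (∀ p ∈ block, p.2 = r) →
    pvBGo (block ++ rs.flatMap f) res cur r
      = (res ++ [cur ++ block.map (fun p => p.1)])
          ++ rs.map (fun r' => (f r').map (fun p => p.1)) := by
  intro rs
  induction rs with
  | nil =>
    intro f r block res cur _ _ _ _ hblock
    revert hblock
    induction block generalizing cur with
    | nil => intro _; simp [pvBGo_nil]
    | cons p bt ihb =>
      intro hblock
      obtain ⟨m, r'⟩ := p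
      have hr : r' = r := hblock (m, r') (by simp)
      subst hr
      rw [List.cons_append, pvBGo_cons, if_neg (by simp)]
      rw [ihb (cur ++ [m]) (fun q hq => hblock q (by simp [hq]))]
      simp
  | cons r1 rt ihr =>
    intro f r block res cur hnd hne hnonempty hconst hblock
    revert hblock
    induction block generalizing cur with
    | cons p bt ihb =>
      intro hblock
      obtain ⟨m, r'⟩ := p
      have hr : r' = r := hblock (m, r') (by simp)
      subst hr
      rw [List.cons_append, pvBGo_cons, if_neg (by simp)]
      rw [ihb (cur ++ [m]) (fun q hq => hblock q (by simp [hq]))]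
      simp
    | nil =>
      intro _
      simp only [List.nil_append, List.flatMap_cons]
      have hfne := hnonempty r1 (by simp)
      obtain ⟨q, qt, hq⟩ : ∃ q qt, f r1 = q :: qt := by
        cases hfq : f r1 with
        | nil => exact absurd hfq hfne
        | cons q qt => exact ⟨q, qt, rfl⟩
      obtain ⟨m1, rq⟩ := q
      have hrq : rq = r1 := hconst r1 (by simp) (m1, rq) (by rw [hq]; simp)
      rw [hrq] at hq
      rw [hq, List.cons_append, pvBGo_cons, if_pos (hne r1 (by simp))]
      have hnd1 := List.nodup_cons.mp hnd
      rw [ihr f r1 qt (res ++ [cur]) [m1] hnd1.2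
        (fun r' hr' => fun h => hnd1.1 (h ▸ hr'))
        (fun r' hr' => hnonempty r' (by simp [hr']))
        (fun r' hr' => hconst r' (by simp [hr']))
        (fun p hp => hconst r1 (by simp) p (by rw [hq]; simp [hp]))]
      simp [hq]

theorem pvStepA (d : PySem.Dict Int (List Int)) (p : Int × Int) :
    (if d.contains p.2 then d else d.insert p.2 ([] : List Int)).modify p.2 []
        (fun l => l ++ [p.1])
      = d.modify p.2 [] (fun l => l ++ [p.1]) := by
  by_cases hc : d.contains p.2
  · rw [if_pos hc]
  · rw [if_neg hc]
    have hgd : d.getD p.2 [] = ([] : List Int) :=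
      PySem.Dict.getD_of_not_contains d [] (by simpa using hc)
    have hins : d.insert p.2 ([] : List Int) = ⟨d.items ++ [(p.2, [])]⟩ := by
      rw [PySem.Dict.insert, if_neg hc]
    rw [PySem.Dict.modify, PySem.Dict.modify, PySem.Dict.getD_insert_self, hgd, hins]
    have hc2 : (PySem.Dict.mk (d.items ++ [(p.2, ([] : List Int))])).contains p.2 = true := by
      rw [PySem.Dict.contains]
      simp
    rw [PySem.Dict.insert, if_pos hc2, PySem.Dict.insert, if_neg hc]
    congr 1
    show (d.items ++ [(p.2, ([] : List Int))]).map _ = d.items ++ [(p.2, [] ++ [p.1])]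
    rw [List.map_append]
    congr 1
    · conv_rhs => rw [← List.map_id d.items]
      apply List.map_congr_left
      intro q hq
      have hq2 : (q.1 == p.2) = false := by
        by_contra h
        apply hc
        rw [PySem.Dict.contains]
        exact List.any_eq_true.mpr ⟨q, hq, by simpa using h⟩
      simp [hq2]
    · simp

theorem pvA_getD (mrs : List (Int × Int)) (c : Int) :
    (mrs.foldl (fun d p => d.modify p.2 [] (fun l => l ++ [p.1]))
        (PySem.Dict.empty : PySem.Dict Int (List Int))).getD c []
      = (pvGrp mrs c).map (fun p => p.1) := by
  have h1 : mrs.foldl (fun d p => d.modify p.2 [] (fun l => l ++ [p.1]))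
        (PySem.Dict.empty : PySem.Dict Int (List Int))
      = (mrs.map (fun p => (p.2, p.1))).foldl
          (fun d q => d.modify q.1 [] (fun l => l ++ [q.2])) PySem.Dict.empty := by
    rw [List.foldl_map]
  rw [h1, PySem.Dict.getD_foldl_modify_append]
  rw [List.filter_map]
  simp only [List.map_map]
  rw [pvGrp]
  congr 1

theorem pvA_keys (mrs : List (Int × Int)) :
    (mrs.foldl (fun d p => d.modify p.2 [] (fun l => l ++ [p.1]))
        (PySem.Dict.empty : PySem.Dict Int (List Int))).keys
      = PySem.List.dedup (mrs.map (fun p => p.2)) := by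
  rw [PySem.Dict.keys_foldl_modify_key mrs (fun p => p.2) [] (fun _ x => (· ++ [x.1]))]
  rw [PySem.Dict.keys_empty, PySem.List.dedup_eq_ofList]
  rfl

theorem pvA_eq (mrs : List (Int × Int)) :
    convert_ratings_to_list_of_list mrs
      = (pvDs mrs).map (fun r => (pvGrp mrs r).map (fun p => p.1)) := by
  unfold convert_ratings_to_list_of_list
  have hfun : (fun (d : PySem.Dict Int (List Int)) (p : Int × Int) =>
        let d := if d.contains p.2 then d else d.insert p.2 ([] : List Int)
        d.modify p.2 [] (fun l => l ++ [p.1]))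
      = fun d p => d.modify p.2 [] (fun l => l ++ [p.1]) :=
    funext fun d => funext fun p => pvStepA d p
  simp only [hfun]
  rw [PySem.List.foldl_append_singleton_eq_map]
  rw [pvA_keys]
  simp only [List.nil_append]
  have : pvDs mrs = PySem.List.sorted (PySem.List.dedup (mrs.map (fun p => p.2)))
      (fun x => x) true := rfl
  rw [← this]
  apply List.map_congr_left
  intro r _
  exact pvA_getD mrs r

theorem pvMain (mrs : List (Int × Int)) :
    convert_ratings_to_list_of_list mrs = convert_ratings_to_list_of_list_alt mrs := by
  rw [pvA_eq]
  unfold convert_ratings_to_list_of_list_alt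
  rw [pvSorted_eq_flat]
  cases hds : pvDs mrs with
  | nil => simp
  | cons r0 rs =>
    have h0 : r0 ∈ pvDs mrs := by rw [hds]; simp
    have h0r : r0 ∈ mrs.map (fun p => p.2) := (pvDs_mem mrs r0).mp h0
    obtain ⟨x, t0, hx⟩ : ∃ x t0, pvGrp mrs r0 = x :: t0 := by
      cases hg : pvGrp mrs r0 with
      | nil => exact absurd hg (pvGrp_ne_nil mrs r0 h0r)
      | cons x t0 => exact ⟨x, t0, rfl⟩
    obtain ⟨m0, rx⟩ := x
    have hrx : rx = r0 := pvGrp_const mrs r0 (m0, rx) (by rw [hx]; simp)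
    rw [hrx] at hx
    rw [List.flatMap_cons, hx, List.cons_append]
    show _ = pvBGo (t0 ++ List.flatMap (pvGrp mrs) rs) [] [m0] r0
    have hpw := pvDs_pairwise mrs
    rw [hds] at hpw
    obtain ⟨hgt, hpt⟩ := List.pairwise_cons.mp hpw
    have hnodup := pvDs_nodup mrs
    rw [hds] at hnodup
    rw [pvBGo_flat rs (pvGrp mrs) r0 t0 [] [m0]
      (List.nodup_cons.mp hnodup).2
      (fun r' hr' => by have := hgt r' hr'; omega)
      (fun r' hr' => pvGrp_ne_nil mrs r' ((pvDs_mem mrs r').mp (by rw [hds]; simp [hr'])))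
      (fun r' hr' => pvGrp_const mrs r')
      (fun p hp => pvGrp_const mrs r0 p (by rw [hx]; simp [hp]))]
    simp [hx]

-- ===== VERDICT (by name: the statement is the Claim_ definition above) =====
theorem convert_ratings_to_list_of_list_spec : Claim_equal_convert_ratings_to_list_of_list := by
  intro movie_ratings _
  unfold Spec_convert_ratings_to_list_of_list
  exact pvMain movie_ratings
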